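-- pv_equiv track=rewrite | github.com/NYCU-RL-Bandits-Lab/Plan2Align | long_context_eval.py | process_gaps
-- ===== SOURCE A (Python) =====
-- def process_gaps(alignments: list) -> tuple:
--     """
--     Process alignment list blocks where the source is empty but target is non-empty,
--     converting them into gap alignments (source converted to a negative gap key).
--
--     Args:
--         alignments (list): Original alignment list (each element is (src_indices, tgt_indices)).
--
--     Returns:
--         tuple: (new_alignments (list), gap_counts (dict))
--     """
--     new_alignments = []
--     gap_counts = {}
--     n = len(alignments)
--     i = 0
--     while i < n:
--         src, tgt = alignments[i]
--         if not src and tgt: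
--             block = []
--             while i < n and not alignments[i][0] and alignments[i][1]:
--                 block.append(alignments[i])
--                 i += 1
--             # Get the left neighbor's source index if available
--             left_src = new_alignments[-1][0][-1] if new_alignments and new_alignments[-1][0] else None
--             # Get the first non-empty source index on the right
--             right_src = None
--             j = i
--             while j < n:
--                 if alignments[j][0]:
--                     right_src = alignments[j][0][0]
--                     break
--                 j += 1
--             gap_key = left_src if left_src is not None else (right_src - 1 if right_src is not None else 0)
--             for item in block:
--                 new_alignments.append(([-gap_key], item[1]))
--             gap_counts[gap_key] = gap_counts.get(gap_key, 0) + len(block)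
--         else:
--             new_alignments.append(alignments[i])
--             i += 1
--     return new_alignments, gap_counts
-- ===== SOURCE B (Python) =====
-- def process_gaps(alignments: list) -> tuple:
--     """One forward pass using a precomputed next-non-empty-source table."""
--     n = len(alignments)
--     rights = [None] * n
--     nxt = None
--     for k in range(n - 1, -1, -1):
--         if alignments[k][0]:
--             nxt = alignments[k][0][0]
--         rights[k] = nxt
--     new_alignments = []
--     gap_counts = {}
--     key = None
--     prev_src = None
--     for (src, tgt), r in zip(alignments, rights):
--         if src or not tgt:
--             new_alignments.append((src, tgt))
--             key = None
--         else:
--             if key is None: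
--                 if prev_src:
--                     key = prev_src[-1]
--                 elif r is not None:
--                     key = r - 1
--                 else:
--                     key = 0
--             new_alignments.append(([-key], tgt))
--             gap_counts[key] = gap_counts.get(key, 0) + 1
--         prev_src = src
--     return new_alignments, gap_counts
-- ===== Notes on version B (the rewrite author's own statement) =====
-- stated objective: alternative
-- what changed: Replaced A's block-at-a-time loop with an inner rescan for the next non-empty source by a backward pass that precomputes the next-non-empty-source value for every position, followed by a single element-at-a-time forward pass that tracks the previous source and the current gap key.
import Mathlib
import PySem

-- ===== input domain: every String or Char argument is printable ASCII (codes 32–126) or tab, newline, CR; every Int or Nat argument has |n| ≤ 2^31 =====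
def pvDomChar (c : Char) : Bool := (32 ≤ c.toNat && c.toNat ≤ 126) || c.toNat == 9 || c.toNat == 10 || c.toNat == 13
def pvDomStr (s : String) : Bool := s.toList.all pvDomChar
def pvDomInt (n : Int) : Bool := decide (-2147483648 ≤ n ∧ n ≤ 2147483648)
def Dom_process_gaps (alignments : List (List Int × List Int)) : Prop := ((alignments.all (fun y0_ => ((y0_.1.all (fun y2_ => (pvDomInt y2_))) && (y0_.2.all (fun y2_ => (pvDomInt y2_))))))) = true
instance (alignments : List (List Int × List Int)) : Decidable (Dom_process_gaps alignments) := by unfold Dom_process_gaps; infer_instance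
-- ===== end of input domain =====

-- B replaces A's per-block right-neighbour rescan by a backward pass precomputing the next
-- non-empty-source value, then a single forward pass (objective: alternative one-pass algorithm).

-- ===== PORT A =====
-- inner `while i < n and not alignments[i][0] and alignments[i][1]` : (block, remaining suffix)
def pvCollectA : List (List Int × List Int) → List (List Int × List Int) × List (List Int × List Int)
  | [] => ([], [])
  | (s, t) :: rest =>
    if s = [] ∧ t ≠ [] then
      let p := pvCollectA rest
      ((s, t) :: p.1, p.2)
    else ([], (s, t) :: rest)

-- inner `while j < n: if alignments[j][0]: right_src = …; break`
def pvFindRightA : List (List Int × List Int) → Option Int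
  | [] => none
  | (s, _) :: rest =>
    match s with
    | a :: _ => some a
    | [] => pvFindRightA rest

-- `new_alignments[-1][0][-1] if new_alignments and new_alignments[-1][0] else None`
def pvLeftA (acc : List (List Int × List Int)) : Option Int :=
  match acc.getLast? with
  | some (s, _) => s.getLast?
  | none => none

theorem pvCollectA_snd_length (l : List (List Int × List Int)) :
    (pvCollectA l).2.length ≤ l.length := by
  induction l with
  | nil => simp [pvCollectA]
  | cons x rest ih =>
    obtain ⟨s, t⟩ := x
    simp only [pvCollectA]
    split
    · simpa using Nat.le_succ_of_le ih
    · simp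

-- the outer `while i < n` loop; state = (new_alignments, gap_counts)
def pvGoA (acc : List (List Int × List Int)) (gc : PySem.Dict Int Int)
    (l : List (List Int × List Int)) : List (List Int × List Int) × PySem.Dict Int Int :=
  match l with
  | [] => (acc, gc)
  | (s, t) :: rest =>
    if s = [] ∧ t ≠ [] then
      let block := (s, t) :: (pvCollectA rest).1
      let rest' := (pvCollectA rest).2
      let gap_key : Int :=
        match pvLeftA acc with
        | some v => v
        | none =>
          match pvFindRightA rest' with
          | some r => r - 1
          | none => 0
      pvGoA (acc ++ block.map (fun item => ([-gap_key], item.2)))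
        (gc.insert gap_key (gc.getD gap_key 0 + (block.length : Int))) rest'
    else
      pvGoA (acc ++ [(s, t)]) gc rest
termination_by l.length
decreasing_by
  · have := pvCollectA_snd_length rest; simp; omega
  · simp

def process_gaps (alignments : List (List Int × List Int)) :
    (List (List Int × List Int)) × (List (Int × Int)) :=
  let r := pvGoA [] PySem.Dict.empty alignments
  (r.1, r.2.items)

-- ===== PORT B =====
-- backward pass: rights[k] = first source index of the next entry (at or after k) with non-empty source
def pvRightsB : List (List Int × List Int) → List (Option Int)
  | [] => []
  | (s, _) :: rest =>
    let rs := pvRightsB rest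
    let cur : Option Int :=
      match s with
      | a :: _ => some a
      | [] =>
        match rs with
        | [] => none
        | o :: _ => o
    cur :: rs

-- one step of the forward loop; state = (new_alignments, gap_counts, key, prev_src)
-- (Python's initial `prev_src = None` is modelled as []: `if prev_src:` treats them alike
-- and prev_src[-1] is only read when prev_src is truthy)
def pvStepB (st : List (List Int × List Int) × PySem.Dict Int Int × Option Int × List Int)
    (x : (List Int × List Int) × Option Int) :
    List (List Int × List Int) × PySem.Dict Int Int × Option Int × List Int :=
  let acc := st.1; let gc := st.2.1; let key := st.2.2.1; let prev := st.2.2.2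
  let s := x.1.1; let t := x.1.2; let r := x.2
  if s ≠ [] ∨ t = [] then
    (acc ++ [(s, t)], gc, none, s)
  else
    let k : Int :=
      match key with
      | some k0 => k0
      | none =>
        match prev.getLast? with
        | some v => v
        | none =>
          match r with
          | some rv => rv - 1
          | none => 0
    (acc ++ [([-k], t)], gc.insert k (gc.getD k 0 + 1), some k, s)

def process_gaps_alt (alignments : List (List Int × List Int)) :
    (List (List Int × List Int)) × (List (Int × Int)) :=
  let st := (alignments.zip (pvRightsB alignments)).foldl pvStepB
    ([], PySem.Dict.empty, none, ([] : List Int))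
  (st.1, st.2.1.items)

-- ===== PRECONDITION & SPEC =====
def Spec_process_gaps (alignments : List (List Int × List Int)) (out : (List (List Int × List Int)) × (List (Int × Int))) : Prop := out = process_gaps_alt alignments
instance (alignments : List (List Int × List Int)) (out : (List (List Int × List Int)) × (List (Int × Int))) : Decidable (Spec_process_gaps alignments out) := by unfold Spec_process_gaps; infer_instance

-- ===== CLAIM (what is proved, stated in full; the proofs are below) =====
def Claim_equal_process_gaps : Prop := ∀ (alignments : List (List Int × List Int)), Dom_process_gaps alignments → Spec_process_gaps alignments (process_gaps alignments)

-- ===== LEMMAS AND PROOFS =====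

theorem pvCollectA_decomp (l : List (List Int × List Int)) :
    (pvCollectA l).1 ++ (pvCollectA l).2 = l := by
  induction l with
  | nil => simp [pvCollectA]
  | cons x rest ih =>
    obtain ⟨s, t⟩ := x
    simp only [pvCollectA]
    split
    · simpa using ih
    · simp

theorem pvCollectA_mem (l : List (List Int × List Int)) :
    ∀ b ∈ (pvCollectA l).1, b.1 = [] ∧ b.2 ≠ [] := by
  induction l with
  | nil => simp [pvCollectA]
  | cons x rest ih =>
    obtain ⟨s, t⟩ := x
    simp only [pvCollectA]
    split
    · rename_i h
      intro b hb
      rcases List.mem_cons.mp hb with h1 | h2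
      · subst h1; exact h
      · exact ih b h2
    · simp

theorem pvCollectA_snd_head (l : List (List Int × List Int)) :
    ∀ s t rest', (pvCollectA l).2 = (s, t) :: rest' → ¬(s = [] ∧ t ≠ []) := by
  induction l with
  | nil => simp [pvCollectA]
  | cons x rest ih =>
    obtain ⟨s0, t0⟩ := x
    simp only [pvCollectA]
    split
    · exact ih
    · rename_i h
      intro s t rest' heq
      rw [List.cons.injEq] at heq
      obtain ⟨h1, _⟩ := heq
      obtain ⟨hs, ht⟩ := Prod.mk.injEq .. ▸ h1
      subst hs; subst ht; exact h

-- B's rights table agrees with A's right scan at the head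
theorem pvRightsB_head (l : List (List Int × List Int)) :
    (match pvRightsB l with | [] => none | o :: _ => o) = pvFindRightA l := by
  induction l with
  | nil => simp [pvRightsB, pvFindRightA]
  | cons x rest ih =>
    obtain ⟨s, t⟩ := x
    cases s with
    | nil => simpa [pvRightsB, pvFindRightA] using ih
    | cons a s' => simp [pvRightsB, pvFindRightA]

theorem pvFindRightA_collect (l : List (List Int × List Int)) :
    pvFindRightA l = pvFindRightA (pvCollectA l).2 := by
  induction l with
  | nil => simp [pvCollectA]
  | cons x rest ih =>
    obtain ⟨s, t⟩ := x
    simp only [pvCollectA]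
    split
    · rename_i h
      have hs : s = [] := h.1
      subst hs
      simpa [pvFindRightA] using ih
    · simp

theorem pvLeftA_append_singleton (acc : List (List Int × List Int)) (s : List Int) (t : List Int) :
    pvLeftA (acc ++ [(s, t)]) = s.getLast? := by
  simp [pvLeftA]

-- iterated single-increment inserts collapse to one insert
theorem pvDictIter (bs : List (List Int × List Int)) :
    ∀ (g : PySem.Dict Int Int) (k c : Int),
      bs.foldl (fun d _ => d.insert k (d.getD k 0 + 1)) (g.insert k (g.getD k 0 + c))
        = g.insert k (g.getD k 0 + (c + (bs.length : Int))) := by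
  induction bs with
  | nil => intro g k c; simp
  | cons b bs ih =>
    intro g k c
    simp only [List.foldl_cons]
    rw [PySem.Dict.getD_insert_self, PySem.Dict.insert_insert_self]
    have : g.getD k 0 + c + 1 = g.getD k 0 + (c + 1) := by ring
    rw [this, ih g k (c + 1)]
    congr 1
    simp
    ring

-- the forward fold over a block of empty-source items with an established key
theorem pvBlockFold (block : List (List Int × List Int)) :
    ∀ (rest' : List (List Int × List Int)) (acc : List (List Int × List Int))
      (gc : PySem.Dict Int Int) (k : Int),
      (∀ b ∈ block, b.1 = [] ∧ b.2 ≠ []) →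
      ((block ++ rest').zip (pvRightsB (block ++ rest'))).foldl pvStepB (acc, gc, some k, ([] : List Int))
        = (rest'.zip (pvRightsB rest')).foldl pvStepB
            (acc ++ block.map (fun b => ([-k], b.2)),
             block.foldl (fun d _ => d.insert k (d.getD k 0 + 1)) gc, some k, ([] : List Int)) := by
  induction block with
  | nil => intro rest' acc gc k _; simp
  | cons b bs ih =>
    intro rest' acc gc k hmem
    obtain ⟨s, t⟩ := b
    have hs : s = [] := (hmem (s, t) (List.mem_cons_self)).1
    have ht : t ≠ [] := (hmem (s, t) (List.mem_cons_self)).2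
    subst hs
    simp only [List.cons_append, pvRightsB, List.zip_cons_cons, List.foldl_cons]
    have hstep : pvStepB (acc, gc, some k, ([] : List Int))
        ((([] : List Int), t), match pvRightsB (bs ++ rest') with | [] => none | o :: _ => o)
        = (acc ++ [([-k], t)], gc.insert k (gc.getD k 0 + 1), some k, ([] : List Int)) := by
      simp [pvStepB, ht]
    rw [hstep, ih rest' (acc ++ [([-k], t)]) (gc.insert k (gc.getD k 0 + 1)) k
      (fun b hb => hmem b (List.mem_cons_of_mem _ hb))]
    simp [List.append_assoc]

-- a non-gap element is appended unchanged, resetting key and prev_src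
theorem pvStepB_nonblock (acc : List (List Int × List Int)) (gc : PySem.Dict Int Int)
    (key : Option Int) (prev s t : List Int) (r : Option Int) (h : s ≠ [] ∨ t = []) :
    pvStepB (acc, gc, key, prev) ((s, t), r) = (acc ++ [(s, t)], gc, none, s) := by
  simp [pvStepB, h]

-- MAIN: A's block loop equals B's forward fold, given that whenever the head of l starts a
-- gap block B's key is unset and A's left neighbour equals B's prev_src
theorem pvMain (N : Nat) :
    ∀ (l : List (List Int × List Int)), l.length ≤ N →
    ∀ (acc : List (List Int × List Int)) (gc : PySem.Dict Int Int)
      (key : Option Int) (prev : List Int),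
      (∀ s t rest, l = (s, t) :: rest → s = [] → t ≠ [] →
        key = none ∧ pvLeftA acc = prev.getLast?) →
      pvGoA acc gc l
        = (fun st => (st.1, st.2.1)) ((l.zip (pvRightsB l)).foldl pvStepB (acc, gc, key, prev)) := by
  induction N with
  | zero =>
    intro l hl acc gc key prev _
    have : l = [] := List.eq_nil_of_length_eq_zero (Nat.le_zero.mp hl)
    subst this
    simp [pvGoA]
  | succ N ih =>
    intro l hl acc gc key prev hsync
    match l with
    | [] => simp [pvGoA]
    | (s, t) :: rest =>
      by_cases hblk : s = [] ∧ t ≠ []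
      · obtain ⟨hs, ht⟩ := hblk
        subst hs
        obtain ⟨hkey, hleft⟩ := hsync [] t rest rfl rfl ht
        subst hkey
        have hlen : rest.length ≤ N := by simpa using hl
        have hlen' : (pvCollectA rest).2.length ≤ N :=
          le_trans (pvCollectA_snd_length rest) hlen
        have hK : ∃ K : Int, K = (match pvLeftA acc with
            | some v => v
            | none => match pvFindRightA (pvCollectA rest).2 with
              | some r => r - 1
              | none => 0) := ⟨_, rfl⟩
        obtain ⟨K, hKdef⟩ := hK
        -- A takes the whole block in one step
        have hA : pvGoA acc gc (([], t) :: rest)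
            = pvGoA (acc ++ ((([] : List Int), t) :: (pvCollectA rest).1).map
                  (fun item => ([-K], item.2)))
                (gc.insert K (gc.getD K 0 + ((((([] : List Int), t) :: (pvCollectA rest).1)).length : Int)))
                (pvCollectA rest).2 := by
          rw [pvGoA]
          rw [if_pos (⟨rfl, ht⟩ : ([] : List Int) = [] ∧ t ≠ [])]
          rw [hKdef]
        -- B's first step computes the same key
        have hstep : pvStepB (acc, gc, none, prev)
            (((([] : List Int)), t), match pvRightsB rest with | [] => none | o :: _ => o)
            = (acc ++ [([-K], t)], gc.insert K (gc.getD K 0 + 1), some K, ([] : List Int)) := by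
          have hr : (match pvRightsB rest with | [] => none | o :: _ => o)
              = pvFindRightA (pvCollectA rest).2 := by
            rw [pvRightsB_head rest, pvFindRightA_collect rest]
          simp only [pvStepB, ht, hr, ← hleft, ← hKdef]
          simp
        -- B's fold over the whole input, reduced to the fold over the remainder
        have hR : (((([] : List Int), t) :: rest).zip (pvRightsB ((([] : List Int), t) :: rest))).foldl
              pvStepB (acc, gc, none, prev)
            = ((pvCollectA rest).2.zip (pvRightsB (pvCollectA rest).2)).foldl pvStepB
                (acc ++ [([-K], t)] ++ (pvCollectA rest).1.map (fun b => ([-K], b.2)),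
                 gc.insert K (gc.getD K 0 + (1 + ((pvCollectA rest).1.length : Int))),
                 some K, ([] : List Int)) := by
          simp only [pvRightsB, List.zip_cons_cons, List.foldl_cons]
          rw [hstep]
          conv_lhs => rw [← pvCollectA_decomp rest]
          rw [pvBlockFold (pvCollectA rest).1 (pvCollectA rest).2 _ _ K (pvCollectA_mem rest)]
          rw [pvDictIter (pvCollectA rest).1 gc K 1]
        rw [hA, hR]
        rw [ih (pvCollectA rest).2 hlen' _ _ (some K) []
          (fun s' t' rest'' heq hs' ht' =>
            absurd ⟨hs', ht'⟩ (pvCollectA_snd_head rest s' t' rest'' heq))]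
        have hacc : acc ++ List.map (fun item => ((([-K] : List Int)), item.2))
              ((([] : List Int), t) :: (pvCollectA rest).1)
            = acc ++ [([-K], t)] ++ List.map (fun b => ((([-K] : List Int)), b.2)) (pvCollectA rest).1 := by
          simp [List.append_assoc]
        have hdict : gc.insert K (gc.getD K 0 + ((((([] : List Int), t) :: (pvCollectA rest).1)).length : Int))
            = gc.insert K (gc.getD K 0 + (1 + ((pvCollectA rest).1.length : Int))) := by
          have h1 : ((((([] : List Int), t) :: (pvCollectA rest).1)).length : Int)
              = 1 + ((pvCollectA rest).1.length : Int) := by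
            simp [List.length_cons]
            ring
          rw [h1]
        rw [hacc, hdict]
      · -- non-block element: both sides append it unchanged and re-synchronise
        have hcond : s ≠ [] ∨ t = [] := by tauto
        rw [pvGoA, if_neg hblk]
        simp only [pvRightsB, List.zip_cons_cons, List.foldl_cons]
        rw [pvStepB_nonblock _ _ _ _ _ _ _ hcond]
        exact ih rest (by simpa using hl) _ _ none s
          (fun s' t' rest'' _ _ _ => ⟨rfl, pvLeftA_append_singleton acc s t⟩)

-- ===== VERDICT (by name: the statement is the Claim_ definition above) =====
theorem process_gaps_spec : Claim_equal_process_gaps := by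
  intro alignments _
  unfold Spec_process_gaps process_gaps process_gaps_alt
  have h := pvMain alignments.length alignments (le_refl _) [] PySem.Dict.empty none []
    (by intro s t rest _ _ _; exact ⟨rfl, by simp [pvLeftA]⟩)
  rw [h]
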